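-- pv_equiv track=rewrite | github.com/fabatka/laserpiente | app/views/quiz_subjuntivo.py | handle_punctuations
-- ===== SOURCE A (Python) =====
-- from typing import List, Optional, Tuple
--
-- punctuations = '-–.,:?'
--
-- def handle_punctuations(sentence_splits: List[str], missing_pos: List[int]) -> Tuple[List[str], List[Optional[int]]]:
--     missing_pos_mod = missing_pos.copy()
--     sentence_splits_mod = []
--     for word in sentence_splits:
--         k = len(sentence_splits_mod)
--         if word[0] in punctuations:
--             sentence_splits_mod.extend([word[0], word[1:]])
--             missing_pos_mod = [m + 1 if m >= k + 1 else m for m in missing_pos_mod]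
--         elif word[-1] in punctuations:
--             sentence_splits_mod.extend([word[:-1], word[-1]])
--             missing_pos_mod = [m + 1 if m > k + 1 else m for m in missing_pos_mod]
--         else:
--             sentence_splits_mod.append(word)
--     return sentence_splits_mod, missing_pos_mod
-- ===== SOURCE B (Python) =====
-- from typing import List, Optional, Tuple
--
-- punctuations = '-–.,:?'
--
-- def handle_punctuations(sentence_splits: List[str], missing_pos: List[int]) -> Tuple[List[str], List[Optional[int]]]:
--     # One pass over the words records, for every split performed, an "adjusted
--     # threshold" t such that an original position m gains +1 for each recorded
--     # t <= m; the thresholds come out sorted, so each position is shifted once,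
--     # by a binary search, instead of being rewritten after every split.
--     splits = []
--     thresholds = []
--     for word in sentence_splits:
--         if word[0] in punctuations:
--             thresholds.append(len(splits) + 1 - len(thresholds))
--             splits.append(word[0])
--             splits.append(word[1:])
--         elif word[-1] in punctuations:
--             thresholds.append(len(splits) + 2 - len(thresholds))
--             splits.append(word[:-1])
--             splits.append(word[-1])
--         else:
--             splits.append(word)
--
--     def shift(m):
--         lo, hi = 0, len(thresholds)
--         while lo < hi:
--             mid = (lo + hi) // 2
--             if thresholds[mid] <= m:
--                 lo = mid + 1
--             else:
--                 hi = mid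
--         return m + lo
--
--     return splits, [shift(m) for m in missing_pos]
-- ===== Notes on version B (the rewrite author's own statement) =====
-- stated objective: alternative
-- what changed: Instead of rewriting the whole missing_pos list after every split (A), B records one sorted 'adjusted threshold' per split in a single pass over the words and then shifts each position with a hand-written binary search over those thresholds.
import Mathlib
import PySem

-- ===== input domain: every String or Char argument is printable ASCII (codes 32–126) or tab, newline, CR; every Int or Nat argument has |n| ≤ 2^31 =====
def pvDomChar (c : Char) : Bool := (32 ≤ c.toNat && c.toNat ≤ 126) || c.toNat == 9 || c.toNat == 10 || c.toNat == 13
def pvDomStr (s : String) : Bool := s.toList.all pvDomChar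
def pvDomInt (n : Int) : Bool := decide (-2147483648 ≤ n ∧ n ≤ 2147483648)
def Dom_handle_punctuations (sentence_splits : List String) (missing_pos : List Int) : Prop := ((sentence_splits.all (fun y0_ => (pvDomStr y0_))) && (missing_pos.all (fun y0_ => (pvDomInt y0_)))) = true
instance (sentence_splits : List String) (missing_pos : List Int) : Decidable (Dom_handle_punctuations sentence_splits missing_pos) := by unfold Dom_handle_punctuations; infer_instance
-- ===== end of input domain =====

-- B replaces A's per-split rewrite of the whole missing_pos list by one pass that records
-- sorted shift thresholds, then shifts each position once with a binary search over them.


-- ===== PORT A =====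
-- punctuations = '-–.,:?'; Python tests `word[0] in punctuations` on a length-1 string,
-- which is exactly char membership in this char list.
def pvPunct : List Char := ['-', '–', '.', ',', ':', '?']

-- one iteration of A's loop; the `none` branches are Python's IndexError on an empty word
-- (excluded by Pre_)
def pvStepA (st : List String × List Int) (word : String) : List String × List Int :=
  let k : Int := st.1.length
  match PySem.Str.pyGet? word 0 with
  | none => st
  | some c0 =>
    if pvPunct.contains c0 then
      (st.1 ++ [String.ofList [c0], PySem.Str.slice word (some 1) none],
       st.2.map (fun m => if k + 1 ≤ m then m + 1 else m))
    else
      match PySem.Str.pyGet? word (-1) with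
      | none => st
      | some cl =>
        if pvPunct.contains cl then
          (st.1 ++ [PySem.Str.slice word none (some (-1)), String.ofList [cl]],
           st.2.map (fun m => if k + 1 < m then m + 1 else m))
        else (st.1 ++ [word], st.2)

def handle_punctuations (sentence_splits : List String) (missing_pos : List Int) : List String × List Int :=
  sentence_splits.foldl pvStepA ([], missing_pos)

-- ===== PORT B =====
-- one iteration of B's loop: same word splitting, but instead of touching the positions it
-- appends the adjusted threshold len(splits)+1-len(thresholds) (resp. +2)
def pvStepB (st : List String × List Int) (word : String) : List String × List Int :=
  match PySem.Str.pyGet? word 0 with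
  | none => st
  | some c0 =>
    if pvPunct.contains c0 then
      (st.1 ++ [String.ofList [c0], PySem.Str.slice word (some 1) none],
       st.2 ++ [(st.1.length : Int) + 1 - st.2.length])
    else
      match PySem.Str.pyGet? word (-1) with
      | none => st
      | some cl =>
        if pvPunct.contains cl then
          (st.1 ++ [PySem.Str.slice word none (some (-1)), String.ofList [cl]],
           st.2 ++ [(st.1.length : Int) + 2 - st.2.length])
        else (st.1 ++ [word], st.2)

-- Source B's hand-written binary search (`shift` without the final `m +`): number of
-- thresholds ≤ m.  ts.getD mid 0 is thresholds[mid]; mid < hi ≤ len always in range.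
-- The extra fuel argument (hi - lo at the call, which the loop strictly decreases)
-- only makes the while-loop total; it never runs out on the actual calls.
def pvCountLE (ts : List Int) (m : Int) : Nat → Nat → Nat → Nat
  | 0, lo, _hi => lo
  | fuel + 1, lo, hi =>
    if lo < hi then
      let mid := (lo + hi) / 2
      if ts.getD mid 0 ≤ m then pvCountLE ts m fuel (mid + 1) hi else pvCountLE ts m fuel lo mid
    else lo

def handle_punctuations_alt (sentence_splits : List String) (missing_pos : List Int) : List String × List Int :=
  let st := sentence_splits.foldl pvStepB ([], [])
  (st.1, missing_pos.map (fun m => m + (pvCountLE st.2 m st.2.length 0 st.2.length : Int)))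

-- ===== PRECONDITION & SPEC =====
-- Pre_ excludes sentence_splits containing an empty word: there Python A (and B) raise
-- IndexError on word[0].
def Pre_handle_punctuations (sentence_splits : List String) (missing_pos : List Int) : Prop :=
  ∀ w ∈ sentence_splits, w ≠ ""
instance (sentence_splits : List String) (missing_pos : List Int) : Decidable (Pre_handle_punctuations sentence_splits missing_pos) := by unfold Pre_handle_punctuations; infer_instance

def pvWitness_handle_punctuations : List String × List Int := (["a,", "-b"], [1, 2])

def Spec_handle_punctuations (sentence_splits : List String) (missing_pos : List Int) (out : List String × List Int) : Prop := out = handle_punctuations_alt sentence_splits missing_pos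
instance (sentence_splits : List String) (missing_pos : List Int) (out : List String × List Int) : Decidable (Spec_handle_punctuations sentence_splits missing_pos out) := by unfold Spec_handle_punctuations; infer_instance

-- ===== CLAIM (what is proved, stated in full; the proofs are below) =====
def Claim_equal_handle_punctuations : Prop := ∀ (sentence_splits : List String) (missing_pos : List Int), Dom_handle_punctuations sentence_splits missing_pos → Pre_handle_punctuations sentence_splits missing_pos → Spec_handle_punctuations sentence_splits missing_pos (handle_punctuations sentence_splits missing_pos)

-- ===== LEMMAS AND PROOFS =====

-- the shift A's loop applies to one individual position
def pvShiftA (sp : List String) (ss : List String) (m : Int) : Int :=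
  match ss with
  | [] => m
  | w :: rest =>
    let k : Int := sp.length
    match PySem.Str.pyGet? w 0 with
    | none => pvShiftA sp rest m
    | some c0 =>
      if pvPunct.contains c0 then
        pvShiftA (sp ++ [String.ofList [c0], PySem.Str.slice w (some 1) none]) rest
          (if k + 1 ≤ m then m + 1 else m)
      else
        match PySem.Str.pyGet? w (-1) with
        | none => pvShiftA sp rest m
        | some cl =>
          if pvPunct.contains cl then
            pvShiftA (sp ++ [PySem.Str.slice w none (some (-1)), String.ofList [cl]]) rest
              (if k + 1 < m then m + 1 else m)
          else pvShiftA (sp ++ [w]) rest m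

-- the adjusted thresholds B's loop records, starting from j already recorded
def pvThs (sp : List String) (j : Nat) (ss : List String) : List Int :=
  match ss with
  | [] => []
  | w :: rest =>
    match PySem.Str.pyGet? w 0 with
    | none => pvThs sp j rest
    | some c0 =>
      if pvPunct.contains c0 then
        ((sp.length : Int) + 1 - j) :: pvThs (sp ++ [String.ofList [c0], PySem.Str.slice w (some 1) none]) (j + 1) rest
      else
        match PySem.Str.pyGet? w (-1) with
        | none => pvThs sp j rest
        | some cl =>
          if pvPunct.contains cl then
            ((sp.length : Int) + 2 - j) :: pvThs (sp ++ [PySem.Str.slice w none (some (-1)), String.ofList [cl]]) (j + 1) rest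
          else pvThs (sp ++ [w]) j rest

theorem pvThs_lb : ∀ (ss sp : List String) (j : Nat), ∀ s ∈ pvThs sp j ss, (sp.length : Int) + 1 - j ≤ s := by
  intro ss
  induction ss with
  | nil => intro sp j s hs; simp [pvThs] at hs
  | cons w rest ih =>
    intro sp j s hs
    rcases h0 : PySem.Str.pyGet? w 0 with _ | c0 <;> simp only [pvThs, h0] at hs
    · exact ih sp j s hs
    · by_cases hc : pvPunct.contains c0
      · rw [if_pos hc] at hs
        rcases List.mem_cons.mp hs with h | h
        · omega
        · have := ih _ _ s h
          simp only [List.length_append, List.length_cons, List.length_nil] at this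
          push_cast at this ⊢
          omega
      · rw [if_neg hc] at hs
        rcases h1 : PySem.Str.pyGet? w (-1) with _ | cl <;> simp only [h1] at hs
        · exact ih sp j s hs
        · by_cases hd : pvPunct.contains cl
          · rw [if_pos hd] at hs
            rcases List.mem_cons.mp hs with h | h
            · omega
            · have := ih _ _ s h
              simp only [List.length_append, List.length_cons, List.length_nil] at this
              push_cast at this ⊢
              omega
          · rw [if_neg hd] at hs
            have := ih _ _ s hs
            simp only [List.length_append, List.length_cons, List.length_nil] at this
            push_cast at this ⊢
            omega

theorem pvThs_sorted : ∀ (ss sp : List String) (j : Nat), (pvThs sp j ss).Pairwise (· ≤ ·) := by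
  intro ss
  induction ss with
  | nil => intro sp j; simp [pvThs]
  | cons w rest ih =>
    intro sp j
    rcases h0 : PySem.Str.pyGet? w 0 with _ | c0 <;> simp only [pvThs, h0]
    · exact ih sp j
    · by_cases hc : pvPunct.contains c0
      · rw [if_pos hc]
        refine List.pairwise_cons.mpr ⟨?_, ih _ _⟩
        intro s hs
        have := pvThs_lb _ _ _ s hs
        simp only [List.length_append, List.length_cons, List.length_nil] at this
        push_cast at this ⊢
        omega
      · rw [if_neg hc]
        rcases h1 : PySem.Str.pyGet? w (-1) with _ | cl <;> simp only [h1]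
        · exact ih sp j
        · by_cases hd : pvPunct.contains cl
          · rw [if_pos hd]
            refine List.pairwise_cons.mpr ⟨?_, ih _ _⟩
            intro s hs
            have := pvThs_lb _ _ _ s hs
            simp only [List.length_append, List.length_cons, List.length_nil] at this
            push_cast at this ⊢
            omega
          · rw [if_neg hd]; exact ih _ _

-- A's loop acts on missing_pos elementwise
theorem foldA_snd : ∀ (ss : List String) (sp : List String) (mm : List Int),
    (ss.foldl pvStepA (sp, mm)).2 = mm.map (pvShiftA sp ss) := by
  intro ss
  induction ss with
  | nil => intro sp mm; simp [pvShiftA]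
  | cons w rest ih =>
    intro sp mm
    rw [List.foldl_cons]
    rcases h0 : PySem.Str.pyGet? w 0 with _ | c0 <;>
      simp only [pvStepA, pvShiftA, h0]
    · exact ih sp mm
    · by_cases hc : pvPunct.contains c0
      · simp only [if_pos hc]
        rw [ih, List.map_map]
        rfl
      · simp only [if_neg hc]
        rcases h1 : PySem.Str.pyGet? w (-1) with _ | cl <;> simp only [h1]
        · exact ih sp mm
        · by_cases hd : pvPunct.contains cl
          · simp only [if_pos hd]
            rw [ih, List.map_map]
            rfl
          · simp only [if_neg hd]
            rw [ih]

-- both loops build the same splits list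
theorem foldA_fst_eq_foldB_fst : ∀ (ss sp : List String) (mm ts : List Int),
    (ss.foldl pvStepA (sp, mm)).1 = (ss.foldl pvStepB (sp, ts)).1 := by
  intro ss
  induction ss with
  | nil => intro sp mm ts; rfl
  | cons w rest ih =>
    intro sp mm ts
    rw [List.foldl_cons, List.foldl_cons]
    rcases h0 : PySem.Str.pyGet? w 0 with _ | c0 <;>
      simp only [pvStepA, pvStepB, h0]
    · exact ih sp mm ts
    · by_cases hc : pvPunct.contains c0
      · rw [if_pos hc, if_pos hc]; exact ih _ _ _
      · rw [if_neg hc, if_neg hc]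
        rcases h1 : PySem.Str.pyGet? w (-1) with _ | cl <;> simp only [h1]
        · exact ih sp mm ts
        · by_cases hd : pvPunct.contains cl
          · rw [if_pos hd, if_pos hd]; exact ih _ _ _
          · rw [if_neg hd, if_neg hd]; exact ih _ _ _

-- B's loop records exactly pvThs
theorem foldB_snd : ∀ (ss sp : List String) (ts : List Int),
    (ss.foldl pvStepB (sp, ts)).2 = ts ++ pvThs sp ts.length ss := by
  intro ss
  induction ss with
  | nil => intro sp ts; simp [pvThs]
  | cons w rest ih =>
    intro sp ts
    rw [List.foldl_cons]
    rcases h0 : PySem.Str.pyGet? w 0 with _ | c0 <;>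
      simp only [pvStepB, pvThs, h0]
    · exact ih sp ts
    · by_cases hc : pvPunct.contains c0
      · rw [if_pos hc, if_pos hc, ih]
        simp [List.append_assoc]
      · rw [if_neg hc, if_neg hc]
        rcases h1 : PySem.Str.pyGet? w (-1) with _ | cl <;> simp only [h1]
        · exact ih sp ts
        · by_cases hd : pvPunct.contains cl
          · rw [if_pos hd, if_pos hd, ih]
            simp [List.append_assoc]
          · rw [if_neg hd, if_neg hd, ih]

-- core: A's elementwise shift = original value + number of adjusted thresholds it reaches
theorem pvShiftA_eq : ∀ (ss sp : List String) (j : Nat) (v : Int),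
    pvShiftA sp ss v = v + ((pvThs sp j ss).countP (fun s => decide (s ≤ v - j)) : Int) := by
  intro ss
  induction ss with
  | nil => intro sp j v; simp [pvShiftA, pvThs]
  | cons w rest ih =>
    intro sp j v
    rcases h0 : PySem.Str.pyGet? w 0 with _ | c0 <;>
      simp only [pvShiftA, pvThs, h0]
    · exact ih sp j v
    · by_cases hc : pvPunct.contains c0
      · rw [if_pos hc, if_pos hc]
        by_cases hv : (sp.length : Int) + 1 ≤ v
        · rw [if_pos hv, ih _ (j + 1), List.countP_cons_of_pos (pa := by simp; omega)]
          have he : (fun s => decide (s ≤ v + 1 - ((j : Int) + 1))) = (fun s => decide (s ≤ v - j)) := by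
            funext s; rw [show v + 1 - ((j : Int) + 1) = v - j from by ring]
          push_cast
          rw [he]
          omega
        · rw [if_neg hv, ih _ (j + 1), List.countP_cons_of_neg (pa := by simp; omega)]
          have z1 : (pvThs (sp ++ [String.ofList [c0], PySem.Str.slice w (some 1) none]) (j + 1) rest).countP (fun s => decide (s ≤ v - ((j : Int) + 1))) = 0 := by
            rw [List.countP_eq_zero]
            intro s hs
            have := pvThs_lb _ _ _ s hs
            simp only [List.length_append, List.length_cons, List.length_nil] at this
            simp only [decide_eq_true_eq]
            push_cast at this ⊢
            omega
          have z2 : (pvThs (sp ++ [String.ofList [c0], PySem.Str.slice w (some 1) none]) (j + 1) rest).countP (fun s => decide (s ≤ v - (j : Int))) = 0 := by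
            rw [List.countP_eq_zero]
            intro s hs
            have := pvThs_lb _ _ _ s hs
            simp only [List.length_append, List.length_cons, List.length_nil] at this
            simp only [decide_eq_true_eq]
            push_cast at this ⊢
            omega
          push_cast
          push_cast at z1
          rw [z1, z2]
        --
      · rw [if_neg hc, if_neg hc]
        rcases h1 : PySem.Str.pyGet? w (-1) with _ | cl <;> simp only [h1]
        · exact ih sp j v
        · by_cases hd : pvPunct.contains cl
          · rw [if_pos hd, if_pos hd]
            by_cases hv : (sp.length : Int) + 1 < v
            · rw [if_pos hv, ih _ (j + 1), List.countP_cons_of_pos (pa := by simp; omega)]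
              have he : (fun s => decide (s ≤ v + 1 - ((j : Int) + 1))) = (fun s => decide (s ≤ v - j)) := by
                funext s; rw [show v + 1 - ((j : Int) + 1) = v - j from by ring]
              push_cast
              rw [he]
              omega
            · rw [if_neg hv, ih _ (j + 1), List.countP_cons_of_neg (pa := by simp; omega)]
              have z1 : (pvThs (sp ++ [PySem.Str.slice w none (some (-1)), String.ofList [cl]]) (j + 1) rest).countP (fun s => decide (s ≤ v - ((j : Int) + 1))) = 0 := by
                rw [List.countP_eq_zero]
                intro s hs
                have := pvThs_lb _ _ _ s hs
                simp only [List.length_append, List.length_cons, List.length_nil] at this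
                simp only [decide_eq_true_eq]
                push_cast at this ⊢
                omega
              have z2 : (pvThs (sp ++ [PySem.Str.slice w none (some (-1)), String.ofList [cl]]) (j + 1) rest).countP (fun s => decide (s ≤ v - (j : Int))) = 0 := by
                rw [List.countP_eq_zero]
                intro s hs
                have := pvThs_lb _ _ _ s hs
                simp only [List.length_append, List.length_cons, List.length_nil] at this
                simp only [decide_eq_true_eq]
                push_cast at this ⊢
                omega
              push_cast
              push_cast at z1
              rw [z1, z2]
          · rw [if_neg hd, if_neg hd]
            exact ih _ j v

-- countP of a monotone-threshold split: first n elements satisfy p, the rest do not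
theorem pvCountP_split (ts : List Int) (p : Int → Bool) (n : Nat) (hn : n ≤ ts.length)
    (h1 : ∀ (i : Nat) (hi : i < ts.length), i < n → p ts[i])
    (h2 : ∀ (i : Nat) (hi : i < ts.length), n ≤ i → ¬ p ts[i]) :
    ts.countP p = n := by
  have key : ((ts.take n) ++ (ts.drop n)).countP p = n := by
    rw [List.countP_append]
    have hta : (ts.take n).countP p = (ts.take n).length := by
      rw [List.countP_eq_length]
      intro a ha
      obtain ⟨i, hi, rfl⟩ := List.mem_iff_getElem.mp ha
      rw [List.getElem_take]
      exact h1 i (by simp at hi; omega) (by simp at hi; omega)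
    have htb : (ts.drop n).countP p = 0 := by
      rw [List.countP_eq_zero]
      intro a ha
      obtain ⟨i, hi, rfl⟩ := List.mem_iff_getElem.mp ha
      rw [List.getElem_drop]
      exact h2 (n + i) (by simp at hi; omega) (by omega)
    rw [hta, htb, List.length_take]
    omega
  rw [← key, List.take_append_drop]

theorem pvSorted_getD_mono (ts : List Int) (hs : ts.Pairwise (· ≤ ·)) (i j : Nat)
    (hij : i ≤ j) (hj : j < ts.length) : ts.getD i 0 ≤ ts.getD j 0 := by
  rcases Nat.eq_or_lt_of_le hij with rfl | h
  · exact le_refl _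
  · rw [List.getD_eq_getElem ts 0 (by omega), List.getD_eq_getElem ts 0 hj]
    exact List.pairwise_iff_getElem.mp hs i j (by omega) hj h

-- invariant of Source B's binary-search loop
theorem pvCountLE_inv (ts : List Int) (m : Int) (hs : ts.Pairwise (· ≤ ·)) :
    ∀ (n lo hi : Nat), hi - lo ≤ n → lo ≤ hi → hi ≤ ts.length →
    (∀ i : Nat, i < lo → ts.getD i 0 ≤ m) →
    (∀ i : Nat, hi ≤ i → i < ts.length → ¬ ts.getD i 0 ≤ m) →
    pvCountLE ts m n lo hi = ts.countP (fun s => decide (s ≤ m)) := by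
  intro n
  induction n with
  | zero =>
    intro lo hi hn h2 h3 h4 h5
    show lo = _
    symm
    apply pvCountP_split ts _ lo (by omega)
    · intro i hi' hlt
      have := h4 i hlt
      rw [List.getD_eq_getElem ts 0 hi'] at this
      simpa using this
    · intro i hi' hge
      have := h5 i (by omega) hi'
      rw [List.getD_eq_getElem ts 0 hi'] at this
      simpa using this
  | succ n ih =>
    intro lo hi hn h2 h3 h4 h5
    by_cases hlt : lo < hi
    · show (if lo < hi then
          if ts.getD ((lo + hi) / 2) 0 ≤ m then pvCountLE ts m n ((lo + hi) / 2 + 1) hi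
          else pvCountLE ts m n lo ((lo + hi) / 2)
        else lo) = _
      rw [if_pos hlt]
      by_cases hm : ts.getD ((lo + hi) / 2) 0 ≤ m
      · rw [if_pos hm]
        apply ih ((lo + hi) / 2 + 1) hi (by omega) (by omega) h3
        · intro i hi'
          exact le_trans (pvSorted_getD_mono ts hs i ((lo + hi) / 2) (by omega) (by omega)) hm
        · exact h5
      · rw [if_neg hm]
        apply ih lo ((lo + hi) / 2) (by omega) (by omega) (by omega)
        · exact h4
        · intro i hge hi' hle
          exact hm (le_trans (pvSorted_getD_mono ts hs ((lo + hi) / 2) i hge hi') hle)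
    · show (if lo < hi then _ else lo) = _
      rw [if_neg hlt]
      symm
      apply pvCountP_split ts _ lo (by omega)
      · intro i hi' hlt'
        have := h4 i hlt'
        rw [List.getD_eq_getElem ts 0 hi'] at this
        simpa using this
      · intro i hi' hge
        have := h5 i (by omega) hi'
        rw [List.getD_eq_getElem ts 0 hi'] at this
        simpa using this

-- binary search computes countP on a sorted list
theorem pvCountLE_eq : ∀ (ts : List Int) (m : Int), ts.Pairwise (· ≤ ·) →
    pvCountLE ts m ts.length 0 ts.length = ts.countP (fun s => decide (s ≤ m)) := by
  intro ts m hs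
  apply pvCountLE_inv ts m hs ts.length 0 ts.length (by omega) (by omega) (le_refl _)
  · intro i hi
    exact absurd hi (Nat.not_lt_zero i)
  · intro i hge hlt
    exact absurd (lt_of_le_of_lt hge hlt) (lt_irrefl _)

-- ===== VERDICT (by name: the statement is the Claim_ definition above) =====
theorem handle_punctuations_spec : Claim_equal_handle_punctuations := by
  intro ss mp _hd _hpre
  unfold Spec_handle_punctuations handle_punctuations handle_punctuations_alt
  refine Prod.ext ?_ ?_
  · exact foldA_fst_eq_foldB_fst ss [] mp []
  · show (ss.foldl pvStepA ([], mp)).2 =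
      mp.map (fun m => m + ((pvCountLE (ss.foldl pvStepB ([], [])).2 m (ss.foldl pvStepB ([], [])).2.length 0 (ss.foldl pvStepB ([], [])).2.length : Nat) : Int))
    rw [foldA_snd ss [] mp, foldB_snd ss [] []]
    simp only [List.nil_append, List.length_nil]
    refine List.map_congr_left ?_
    intro m _
    rw [pvShiftA_eq ss [] 0 m, pvCountLE_eq _ m (pvThs_sorted ss [] 0)]
    norm_num
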